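-- pv_equiv track=rewrite | github.com/algorethmpwd/greaper | greaper.py | parse_domain_pattern
-- ===== SOURCE A (Python) =====
-- def parse_domain_pattern(url):
--     """Parse domain pattern and return the base domain and position for enumeration"""
--     # Remove protocol if present
--     domain = url.split('://')[-1].strip('/')
--
--     if '*' not in domain:
--         return domain, None
--
--     parts = domain.split('.')
--     wildcard_index = next(i for i, part in enumerate(parts) if '*' in part)
--     base_domain = '.'.join(parts[wildcard_index + 1:])
--     prefix = '.'.join(parts[:wildcard_index]) + '.' if wildcard_index > 0 else ''
--
--     return base_domain, prefix
-- ===== SOURCE B (Python) =====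
-- def parse_domain_pattern(url):
--     """Parse domain pattern and return the base domain and position for enumeration"""
--     domain = url.split('://')[-1].strip('/')
--     if '*' not in domain:
--         return domain, None
--     # single pass over the characters: accumulate prefix label by label until the
--     # label containing '*' is closed by a dot, then collect everything after that dot
--     prefix = []
--     label = []
--     base = None
--     for ch in domain:
--         if base is not None:
--             base.append(ch)
--         elif ch == '.':
--             if '*' in label:
--                 base = []
--             else:
--                 prefix += label
--                 prefix.append('.')
--                 label = []
--         else:
--             label.append(ch)
--     if base is None:
--         base = []
--     return ''.join(base), ''.join(prefix)
-- ===== Notes on version B (the rewrite author's own statement) =====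
-- stated objective: alternative
-- what changed: Instead of splitting the domain into a list of labels, locating the wildcard label by index and rebuilding base/prefix with '.'-joins, B makes a single character pass over the domain with a small state machine (current label, accumulated prefix, optional base) that emits the prefix label by label and switches to collecting the base at the dot closing the wildcard label.
import Mathlib
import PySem

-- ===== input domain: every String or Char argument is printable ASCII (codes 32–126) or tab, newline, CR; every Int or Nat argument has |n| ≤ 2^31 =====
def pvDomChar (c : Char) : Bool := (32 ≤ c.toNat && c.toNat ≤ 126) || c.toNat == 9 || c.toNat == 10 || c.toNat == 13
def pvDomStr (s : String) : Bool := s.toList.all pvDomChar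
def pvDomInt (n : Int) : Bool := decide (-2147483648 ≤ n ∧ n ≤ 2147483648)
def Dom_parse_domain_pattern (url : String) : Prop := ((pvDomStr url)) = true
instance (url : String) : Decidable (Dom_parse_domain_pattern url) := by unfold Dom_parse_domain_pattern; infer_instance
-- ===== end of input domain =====

-- B replaces A's split-into-labels / wildcard index / '.'-joins by a single character pass
-- with a small state machine (prefix, current label, optional base) — alternative, same cost.

-- ===== PORT A =====
-- domain = url.split('://')[-1].strip('/'); the split list is never empty, so [-1] cannot raise
def parse_domain_pattern (url : String) : String × Option String :=
  let pieces := (PySem.Chars.split? url.toList [':', '/', '/']).getD []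
  let domain := PySem.Chars.stripChars ((PySem.List.pyGet? pieces (-1)).getD []) ['/']
  if PySem.Chars.isIn ['*'] domain = false then (String.ofList domain, none)
  else
    let parts := PySem.Chars.splitOn domain ['.']
    -- next(i for i, part in enumerate(parts) if '*' in part): the guard guarantees a hit,
    -- so next cannot raise and findIdx is its value
    let wildcard_index := parts.findIdx (fun p => PySem.Chars.isIn ['*'] p)
    let base_domain := PySem.Chars.join ['.'] (parts.drop (wildcard_index + 1))
    let pre := if 0 < wildcard_index then PySem.Chars.join ['.'] (parts.take wildcard_index) ++ ['.'] else []
    (String.ofList base_domain, some (String.ofList pre))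

-- ===== PORT B =====
-- one loop iteration of Source B: state = (prefix, label, base); base = none until the
-- dot closing the wildcard label is reached, then some (chars collected after it)
def pdpStep (st : List Char × List Char × Option (List Char)) (ch : Char) :
    List Char × List Char × Option (List Char) :=
  match st with
  | (p, l, some bs) => (p, l, some (bs ++ [ch]))
  | (p, l, none) =>
    if ch = '.' then
      if '*' ∈ l then (p, l, some [])
      else (p ++ l ++ ['.'], [], none)
    else (p, l ++ [ch], none)

def parse_domain_pattern_alt (url : String) : String × Option String :=
  let pieces := (PySem.Chars.split? url.toList [':', '/', '/']).getD []
  let domain := PySem.Chars.stripChars ((PySem.List.pyGet? pieces (-1)).getD []) ['/']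
  if PySem.Chars.isIn ['*'] domain = false then (String.ofList domain, none)
  else
    let st := domain.foldl pdpStep ([], [], none)
    (String.ofList (st.2.2.getD []), some (String.ofList st.1))

-- ===== PRECONDITION & SPEC =====
def Spec_parse_domain_pattern (url : String) (out : String × Option String) : Prop := out = parse_domain_pattern_alt url
instance (url : String) (out : String × Option String) : Decidable (Spec_parse_domain_pattern url out) := by unfold Spec_parse_domain_pattern; infer_instance

-- ===== CLAIM (what is proved, stated in full; the proofs are below) =====
def Claim_equal_parse_domain_pattern : Prop := ∀ (url : String), Dom_parse_domain_pattern url → Spec_parse_domain_pattern url (parse_domain_pattern url)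

-- ===== LEMMAS AND PROOFS =====

-- simple split of a char list on '.': (first piece, remaining pieces)
def msp : List Char → List Char × List (List Char)
  | [] => ([], [])
  | x :: t => let r := msp t; if x = '.' then ([], r.1 :: r.2) else (x :: r.1, r.2)

def pparts (cs : List Char) : List (List Char) := (msp cs).1 :: (msp cs).2
def pwi (cs : List Char) : Nat := (pparts cs).findIdx (fun q => PySem.Chars.isIn ['*'] q)

theorem go_cons (fuel : Nat) (x : Char) (t cur : List Char) (acc : List (List Char)) :
    PySem.Chars.splitOn.go ['.'] (fuel + 1) (x :: t) cur acc =
      if x = '.' then PySem.Chars.splitOn.go ['.'] fuel t [] (cur.reverse :: acc)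
      else PySem.Chars.splitOn.go ['.'] fuel t (x :: cur) acc := by
  by_cases hx : x = '.'
  · subst hx
    rw [if_pos rfl]
    have hpre : List.isPrefixOf ['.'] ('.' :: t) = true := by simp [List.isPrefixOf]
    simp [PySem.Chars.splitOn.go, hpre]
  · rw [if_neg hx]
    have hpre : List.isPrefixOf ['.'] (x :: t) = false := by
      simp [List.isPrefixOf]; exact fun e => absurd e.symm hx
    simp [PySem.Chars.splitOn.go, hpre]

theorem splitOn_go_spec : ∀ (l : List Char) (fuel : Nat) (cur : List Char) (acc : List (List Char)),
    l.length < fuel →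
    PySem.Chars.splitOn.go ['.'] fuel l cur acc = acc.reverse ++ (cur.reverse ++ (msp l).1) :: (msp l).2 := by
  intro l
  induction l with
  | nil =>
    intro fuel cur acc h
    match fuel, h with
    | fuel + 1, _ => simp [PySem.Chars.splitOn.go, msp]
  | cons x t ih =>
    intro fuel cur acc h
    match fuel, h with
    | fuel + 1, h2 =>
      have ht : t.length < fuel := by simp only [List.length_cons] at h2; omega
      rw [go_cons]
      by_cases hx : x = '.'
      · rw [if_pos hx, ih fuel [] (cur.reverse :: acc) ht]
        subst hx; simp [msp]
      · rw [if_neg hx, ih fuel (x :: cur) acc ht]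
        simp [msp, hx]

theorem splitOn_eq (l : List Char) : PySem.Chars.splitOn l ['.'] = pparts l := by
  unfold PySem.Chars.splitOn
  rw [splitOn_go_spec l (l.length + 1) [] [] (by omega)]
  simp [pparts]

theorem msp_append : ∀ (xs ys : List Char),
    msp (xs ++ '.' :: ys) = ((msp xs).1, (msp xs).2 ++ (msp ys).1 :: (msp ys).2) := by
  intro xs ys
  induction xs with
  | nil => simp [msp]
  | cons x t ih =>
    by_cases hx : x = '.'
    · simp [msp, hx, ih]
    · simp [msp, hx, ih]

theorem msp_no_dot : ∀ (xs : List Char), '.' ∉ xs → msp xs = (xs, []) := by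
  intro xs h
  induction xs with
  | nil => simp [msp]
  | cons x t ih =>
    simp only [List.mem_cons, not_or] at h
    simp [msp, Ne.symm h.1, ih h.2]

theorem join_cons_head (sep : List Char) (x : Char) (h : List Char) (tl : List (List Char)) :
    PySem.Chars.join sep ((x :: h) :: tl) = x :: PySem.Chars.join sep (h :: tl) := by
  cases tl with
  | nil => simp [PySem.Chars.join_singleton]
  | cons b t2 => simp [PySem.Chars.join_cons_cons]

theorem join_msp : ∀ (xs : List Char), PySem.Chars.join ['.'] (pparts xs) = xs := by
  intro xs
  induction xs with
  | nil => simp [pparts, msp, PySem.Chars.join_singleton]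
  | cons x t ih =>
    by_cases hx : x = '.'
    · subst hx
      simp only [pparts, msp, if_true]
      rw [PySem.Chars.join_cons_cons]
      simpa [pparts] using ih
    · simp only [pparts, msp, if_neg hx] at ih ⊢
      rw [join_cons_head]
      exact congrArg (x :: ·) ih

theorem singleton_infix (a : Char) (l : List Char) : [a] <:+: l ↔ a ∈ l := by
  constructor
  · intro h; exact h.sublist.subset (List.mem_singleton_self a)
  · intro h
    obtain ⟨s, t, e⟩ := List.append_of_mem h
    exact ⟨s, t, by simp [e]⟩

theorem isIn_true {a : Char} {l : List Char} (h : a ∈ l) : PySem.Chars.isIn [a] l = true :=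
  (PySem.Chars.isIn_iff_infix _ _).mpr ((singleton_infix a l).mpr h)

theorem isIn_false {a : Char} {l : List Char} (h : a ∉ l) : PySem.Chars.isIn [a] l = false := by
  rw [← Bool.not_eq_true, PySem.Chars.isIn_iff_infix, singleton_infix]; exact h

theorem exists_first {c : Char} : ∀ {l : List Char}, c ∈ l → ∃ l1 l2, l = l1 ++ c :: l2 ∧ c ∉ l1 := by
  intro l
  induction l with
  | nil => intro h; simp at h
  | cons x t ih =>
    intro h
    by_cases hx : x = c
    · exact ⟨[], t, by simp [hx], by simp⟩
    · have hc : c ∈ t := by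
        rcases List.mem_cons.mp h with h' | h'
        · exact absurd h'.symm hx
        · exact h'
      obtain ⟨l1, l2, e, hn⟩ := ih hc
      exact ⟨x :: l1, l2, by simp [e], by
        simp only [List.mem_cons, not_or]
        exact ⟨fun e' => hx e'.symm, hn⟩⟩

-- once base has started, the loop only appends characters to it
theorem foldl_some : ∀ (cs p l bs : List Char),
    cs.foldl pdpStep (p, l, some bs) = (p, l, some (bs ++ cs)) := by
  intro cs
  induction cs with
  | nil => simp
  | cons c t ih => intro p l bs; simp [pdpStep, ih]

-- within a dot-free stretch the loop only grows the current label
theorem foldl_label : ∀ (xs : List Char), '.' ∉ xs → ∀ (p l : List Char),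
    xs.foldl pdpStep (p, l, none) = (p, l ++ xs, none) := by
  intro xs
  induction xs with
  | nil => simp
  | cons c t ih =>
    intro h p l
    simp only [List.mem_cons, not_or] at h
    have hc : ¬ (c = '.') := fun e => h.1 e.symm
    simp [pdpStep, hc, ih h.2]

theorem flatMap_dot : ∀ (l : List (List Char)),
    l.flatMap (fun q => q ++ ['.']) =
      if l = [] then [] else PySem.Chars.join ['.'] l ++ ['.'] := by
  intro l
  induction l with
  | nil => simp
  | cons a t ih =>
    cases t with
    | nil => simp [PySem.Chars.join_singleton]
    | cons b t2 =>
      rw [List.flatMap_cons, ih]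
      simp [PySem.Chars.join_cons_cons]

-- invariant of the whole loop on a domain containing '*'
theorem fold_spec : ∀ (n : Nat) (cs : List Char), cs.length ≤ n → '*' ∈ cs → ∀ (p : List Char),
    ∃ l b, cs.foldl pdpStep (p, [], none) =
        (p ++ ((pparts cs).take (pwi cs)).flatMap (fun q => q ++ ['.']), l, b) ∧
      b.getD [] = PySem.Chars.join ['.'] ((pparts cs).drop (pwi cs + 1)) := by
  intro n
  induction n with
  | zero =>
    intro cs hlen hstar p
    have : cs = [] := List.eq_nil_of_length_eq_zero (Nat.le_zero.mp hlen)
    subst this; simp at hstar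
  | succ n ih =>
    intro cs hlen hstar p
    by_cases hd : '.' ∈ cs
    · obtain ⟨h, t, rfl, hh⟩ := exists_first hd
      have hpp : pparts (h ++ '.' :: t) = h :: pparts t := by
        simp [pparts, msp_append, msp_no_dot h hh]
      have hfold1 : (h ++ '.' :: t).foldl pdpStep (p, [], none) =
          ('.' :: t).foldl pdpStep (p, h, none) := by
        rw [List.foldl_append, foldl_label h hh p []]
        simp
      by_cases hsh : '*' ∈ h
      · -- wildcard label closed by this dot: base collection starts
        have hwi : pwi (h ++ '.' :: t) = 0 := by
          simp [pwi, hpp, List.findIdx_cons, isIn_true hsh]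
        refine ⟨h, some t, ?_, ?_⟩
        · rw [hfold1, hwi]
          simp only [List.foldl_cons]
          have hstep : pdpStep (p, h, none) '.' = (p, h, some []) := by simp [pdpStep, hsh]
          rw [hstep, foldl_some]
          simp
        · rw [hwi, hpp]
          simp [join_msp]
      · -- ordinary label: emitted into the prefix, continue on t
        have hst : '*' ∈ t := by
          rcases List.mem_append.mp hstar with h' | h'
          · exact absurd h' hsh
          · rcases List.mem_cons.mp h' with h'' | h''
            · exact absurd h''.symm (by decide)
            · exact h''
        have htl : t.length ≤ n := by
          simp only [List.length_append, List.length_cons] at hlen; omega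
        have hwi : pwi (h ++ '.' :: t) = pwi t + 1 := by
          simp [pwi, hpp, List.findIdx_cons, isIn_false hsh]
        obtain ⟨l, b, he, hb⟩ := ih t htl hst (p ++ h ++ ['.'])
        refine ⟨l, b, ?_, ?_⟩
        · rw [hfold1]
          simp only [List.foldl_cons]
          have hstep : pdpStep (p, h, none) '.' = (p ++ h ++ ['.'], [], none) := by
            simp [pdpStep, hsh]
          rw [hstep, he, hwi, hpp]
          simp
        · rw [hwi, hpp, List.drop_succ_cons]
          exact hb
    · -- no dot at all: the whole domain is the wildcard label, base never starts
      have hwi : pwi cs = 0 := by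
        simp [pwi, pparts, msp_no_dot cs hd, List.findIdx_cons, isIn_true hstar]
      refine ⟨cs, none, ?_, ?_⟩
      · rw [foldl_label cs hd p [], hwi]
        simp
      · rw [hwi]
        simp [pparts, msp_no_dot cs hd, PySem.Chars.join_nil]

-- the branch on '*' evaluated the same way in both ports
theorem branch_eq (cs : List Char) :
    (if PySem.Chars.isIn ['*'] cs = false then (String.ofList cs, (none : Option String))
     else
       (String.ofList (PySem.Chars.join ['.']
          ((PySem.Chars.splitOn cs ['.']).drop
            ((PySem.Chars.splitOn cs ['.']).findIdx (fun p => PySem.Chars.isIn ['*'] p) + 1))),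
        some (String.ofList
          (if 0 < (PySem.Chars.splitOn cs ['.']).findIdx (fun p => PySem.Chars.isIn ['*'] p) then
            PySem.Chars.join ['.']
              ((PySem.Chars.splitOn cs ['.']).take
                ((PySem.Chars.splitOn cs ['.']).findIdx (fun p => PySem.Chars.isIn ['*'] p))) ++ ['.']
           else []))))
  = (if PySem.Chars.isIn ['*'] cs = false then (String.ofList cs, (none : Option String))
     else
       (String.ofList ((cs.foldl pdpStep ([], [], none)).2.2.getD []),
        some (String.ofList (cs.foldl pdpStep ([], [], none)).1))) := by
  by_cases hc : PySem.Chars.isIn ['*'] cs = false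
  · rw [if_pos hc, if_pos hc]
  · rw [if_neg hc, if_neg hc]
    have hstar : '*' ∈ cs := by
      have := (PySem.Chars.isIn_iff_infix ['*'] cs).mp (by simpa using hc)
      exact (singleton_infix '*' cs).mp this
    obtain ⟨l, b, he, hb⟩ := fold_spec cs.length cs (le_refl _) hstar []
    rw [he]
    simp only [splitOn_eq]
    have hpw : (pparts cs).findIdx (fun q => PySem.Chars.isIn ['*'] q) = pwi cs := rfl
    rw [hpw]
    refine congrArg₂ Prod.mk (congrArg _ hb.symm) (congrArg _ (congrArg _ ?_))
    rw [List.nil_append, flatMap_dot]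
    by_cases hz : 0 < pwi cs
    · rw [if_pos hz, if_neg ?_]
      intro hnil
      rcases (List.take_eq_nil_iff).mp hnil with h0 | h0
      · omega
      · exact absurd h0 (by simp [pparts])
    · have h0 : pwi cs = 0 := by omega
      rw [if_neg hz, h0]
      simp

-- ===== VERDICT (by name: the statement is the Claim_ definition above) =====
theorem parse_domain_pattern_spec : Claim_equal_parse_domain_pattern := by
  intro url _
  show parse_domain_pattern url = parse_domain_pattern_alt url
  unfold parse_domain_pattern parse_domain_pattern_alt
  exact branch_eq _
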